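-- pv_equiv track=rewrite | github.com/arusli1/IdleKV2 | phases/phase14_critical_flaw_closure/src/repodelta.py | _line_char_bounds
-- ===== SOURCE A (Python) =====
-- def _line_char_bounds(card_start: int, card: str, line_no: int) -> tuple[int, int]:
--     offset = 0
--     lines = card.splitlines(keepends=True)
--     for current, line in enumerate(lines, start=1):
--         next_offset = offset + len(line)
--         if current == line_no + 1:
--             return card_start + offset, card_start + next_offset
--         offset = next_offset
--     raise ValueError(f"Line {line_no} is outside generated card.")
-- ===== SOURCE B (Python) =====
-- def _line_char_bounds(card_start: int, card: str, line_no: int) -> tuple[int, int]: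
--     lines = card.splitlines(keepends=True)
--     offsets = [0]
--     total = 0
--     for line in lines:
--         total += len(line)
--         offsets.append(total)
--     if not (0 <= line_no < len(lines)):
--         raise ValueError(f"Line {line_no} is outside generated card.")
--     return card_start + offsets[line_no], card_start + offsets[line_no + 1]
-- ===== Notes on version B (the rewrite author's own statement) =====
-- stated objective: alternative
-- what changed: Replaces A's early-returning enumerate loop (running offset, return when the counter hits line_no+1) with building the full prefix-sum table of cumulative line lengths, a bounds guard, and two table lookups.
import Mathlib
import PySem

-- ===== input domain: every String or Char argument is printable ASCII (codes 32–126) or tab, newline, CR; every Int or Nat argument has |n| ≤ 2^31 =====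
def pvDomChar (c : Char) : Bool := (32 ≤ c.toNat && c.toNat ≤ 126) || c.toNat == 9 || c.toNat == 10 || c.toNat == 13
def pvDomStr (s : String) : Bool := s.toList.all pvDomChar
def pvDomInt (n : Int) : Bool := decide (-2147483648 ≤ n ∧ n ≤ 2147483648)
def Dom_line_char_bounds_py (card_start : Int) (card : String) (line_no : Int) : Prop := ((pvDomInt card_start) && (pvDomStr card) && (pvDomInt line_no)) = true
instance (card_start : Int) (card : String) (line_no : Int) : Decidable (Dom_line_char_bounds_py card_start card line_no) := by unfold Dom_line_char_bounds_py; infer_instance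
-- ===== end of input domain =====

-- B replaces A's early-returning counter loop by a prefix-sum offset table plus two lookups (objective: alternative; return-value equivalence).

-- ===== PORT A =====
-- hand port of str.splitlines(keepends=True); exact on Dom's character set (printable ASCII, tab, '\n', '\r', '\r\n')
def pvSplitKeep (acc : List Char) : List Char → List (List Char)
  | [] => if acc.isEmpty then [] else [acc.reverse]
  | '\r' :: '\n' :: rest => (acc.reverse ++ ['\r', '\n']) :: pvSplitKeep [] rest
  | '\r' :: rest => (acc.reverse ++ ['\r']) :: pvSplitKeep [] rest
  | '\n' :: rest => (acc.reverse ++ ['\n']) :: pvSplitKeep [] rest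
  | c :: rest => pvSplitKeep (c :: acc) rest
termination_by l => l.length

def lcbLoopA (card_start line_no current offset : Int) : List (List Char) → Int × Int
  | [] => (0, 0)  -- Python raises ValueError here; excluded by Pre_
  | line :: rest =>
    let next_offset := offset + (line.length : Int)
    if current = line_no + 1 then (card_start + offset, card_start + next_offset)
    else lcbLoopA card_start line_no (current + 1) next_offset rest

def line_char_bounds_py (card_start : Int) (card : String) (line_no : Int) : Int × Int :=
  lcbLoopA card_start line_no 1 0 (pvSplitKeep [] card.toList)

-- ===== PORT B =====
-- offsets = [0]; total = 0; for line in lines: total += len(line); offsets.append(total)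
def lcbOffsets (total : Int) : List (List Char) → List Int
  | [] => [total]
  | l :: rest => total :: lcbOffsets (total + (l.length : Int)) rest

def line_char_bounds_py_alt (card_start : Int) (card : String) (line_no : Int) : Int × Int :=
  let lines := pvSplitKeep [] card.toList
  let offsets := lcbOffsets 0 lines
  if 0 ≤ line_no ∧ line_no < (lines.length : Int) then
    (card_start + PySem.List.pyGetD offsets line_no 0,
     card_start + PySem.List.pyGetD offsets (line_no + 1) 0)
  else (0, 0)  -- Python raises ValueError here; excluded by Pre_

-- ===== PRECONDITION & SPEC =====
-- Pre_: exactly the inputs where A returns (line_no names an existing line); A raises ValueError otherwise.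
def Pre_line_char_bounds_py (_card_start : Int) (card : String) (line_no : Int) : Prop :=
  0 ≤ line_no ∧ line_no < ((PySem.Str.splitlines card).length : Int)
instance (card_start : Int) (card : String) (line_no : Int) : Decidable (Pre_line_char_bounds_py card_start card line_no) := by unfold Pre_line_char_bounds_py; infer_instance

def pvWitness_line_char_bounds_py : Int × String × Int := (10, "ab\ncd\n", 1)

def Spec_line_char_bounds_py (card_start : Int) (card : String) (line_no : Int) (out : Int × Int) : Prop := out = line_char_bounds_py_alt card_start card line_no
instance (card_start : Int) (card : String) (line_no : Int) (out : Int × Int) : Decidable (Spec_line_char_bounds_py card_start card line_no out) := by unfold Spec_line_char_bounds_py; infer_instance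

-- ===== CLAIM (what is proved, stated in full; the proofs are below) =====
def Claim_equal_line_char_bounds_py : Prop := ∀ (card_start : Int) (card : String) (line_no : Int), Dom_line_char_bounds_py card_start card line_no → Pre_line_char_bounds_py card_start card line_no → Spec_line_char_bounds_py card_start card line_no (line_char_bounds_py card_start card line_no)

-- ===== LEMMAS AND PROOFS =====

def pvPre (lines : List (List Char)) (k : Nat) : Int :=
  ((lines.take k).map (fun l => (l.length : Int))).sum

theorem pvPre_zero (lines : List (List Char)) : pvPre lines 0 = 0 := rfl

theorem pvPre_cons (l : List Char) (lines : List (List Char)) (k : Nat) :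
    pvPre (l :: lines) (k + 1) = (l.length : Int) + pvPre lines k := by
  simp [pvPre, List.take_succ_cons]

theorem lcbLoopA_eq (card_start line_no : Int) :
    ∀ (lines : List (List Char)) (current offset : Int),
      0 ≤ line_no + 1 - current → line_no + 1 - current < (lines.length : Int) →
      lcbLoopA card_start line_no current offset lines =
        (card_start + offset + pvPre lines (line_no + 1 - current).toNat,
         card_start + offset + pvPre lines ((line_no + 1 - current).toNat + 1)) := by
  intro lines
  induction lines with
  | nil => intro current offset h1 h2; simp at h2; omega
  | cons l rest ih =>
    intro current offset h1 h2
    by_cases hc : current = line_no + 1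
    · have : (line_no + 1 - current).toNat = 0 := by omega
      simp [lcbLoopA, hc, pvPre]
      ring
    · have hk : 0 ≤ line_no + 1 - (current + 1) := by omega
      have hk2 : line_no + 1 - (current + 1) < (rest.length : Int) := by
        simp at h2; omega
      have hrec := ih (current + 1) (offset + (l.length : Int)) hk hk2
      have hn : (line_no + 1 - current).toNat = (line_no + 1 - (current + 1)).toNat + 1 := by omega
      simp only [lcbLoopA, if_neg (by omega : ¬ current = line_no + 1)]
      rw [hrec, hn, pvPre_cons, pvPre_cons, Prod.mk.injEq]
      constructor <;> ring

theorem lcbOffsets_getD (lines : List (List Char)) :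
    ∀ (t : Int) (k : Nat), k ≤ lines.length →
      (lcbOffsets t lines).getD k 0 = t + pvPre lines k := by
  induction lines with
  | nil =>
    intro t k hk
    simp only [List.length_nil, Nat.le_zero] at hk
    subst hk
    simp [lcbOffsets, pvPre]
  | cons l rest ih =>
    intro t k hk
    cases k with
    | zero => simp [lcbOffsets, pvPre_zero]
    | succ k' =>
      simp only [lcbOffsets, List.getD_cons_succ, pvPre_cons]
      rw [ih (t + (l.length : Int)) k' (by simpa using hk)]
      ring

theorem lcbOffsets_length (lines : List (List Char)) (t : Int) :
    (lcbOffsets t lines).length = lines.length + 1 := by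
  induction lines generalizing t with
  | nil => rfl
  | cons l rest ih => simp [lcbOffsets, ih]


theorem pvChar_eq_of_toNat {c d : Char} (h : c.toNat = d.toNat) : c = d :=
  Char.ext (UInt32.toNat_inj.mp h)

-- on Dom's character set, splitlines.go's break test agrees with {'\n','\r'}, and go
-- produces exactly the lines pvSplitKeep produces (same count in particular)
theorem pvGo_len (f : Char → Bool)
    (hnl : f '\n' = true) (hcr : f '\r' = true)
    (hother : ∀ c, pvDomChar c = true → c ≠ '\n' → c ≠ '\r' → f c = false) :
    ∀ (cur cs : List Char), (∀ c ∈ cs, pvDomChar c = true) →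
      ∀ (accL : List (List Char)),
      (PySem.Chars.splitlines.go f cs cur accL).length = accL.length + (pvSplitKeep cur cs).length := by
  intro cur cs
  induction cur, cs using pvSplitKeep.induct with
  | case1 acc he =>
    intro _ accL
    simp [PySem.Chars.splitlines.go.eq_1, pvSplitKeep, he]
  | case2 acc he =>
    intro _ accL
    simp [PySem.Chars.splitlines.go.eq_1, pvSplitKeep, he]
  | case3 acc rest ih =>
    intro hd accL
    rw [PySem.Chars.splitlines.go.eq_2, ih (fun c hc => hd c (by simp [hc])),
      pvSplitKeep.eq_2]
    simp
    omega
  | case4 acc rest hne ih =>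
    intro hd accL
    rw [PySem.Chars.splitlines.go.eq_3 f acc accL '\r' rest (fun r1 _ hr => hne r1 hr),
      if_pos hcr, ih (fun c hc => hd c (by simp [hc])),
      pvSplitKeep.eq_3 acc rest hne]
    simp
    omega
  | case5 acc rest ih =>
    intro hd accL
    rw [PySem.Chars.splitlines.go.eq_3 f acc accL '\n' rest
        (fun _ h _ => absurd h (by decide)),
      if_pos hnl, ih (fun c hc => hd c (by simp [hc])),
      pvSplitKeep.eq_4]
    simp
    omega
  | case6 acc c rest h1 h2 h3 ih =>
    intro hd accL
    have hfc : f c = false :=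
      hother c (hd c (by simp)) (fun h => h3 h) (fun h => h2 h)
    rw [PySem.Chars.splitlines.go.eq_3 f acc accL c rest h1, if_neg (by simp [hfc]),
      ih (fun c hc => hd c (by simp [hc])),
      pvSplitKeep.eq_5 acc c rest h1 h2 h3]

theorem pvSplitlines_len (card : String) (hdom : pvDomStr card = true) :
    (PySem.Str.splitlines card).length = (pvSplitKeep [] card.toList).length := by
  have h1 : (PySem.Str.splitlines card).length = (PySem.Chars.splitlines card.toList).length := by
    rw [← PySem.Str.splitlines_map_toList, List.length_map]
  rw [h1]
  have hoth : ∀ c, pvDomChar c = true → c ≠ '\n' → c ≠ '\r' →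
      (decide (c.toNat = 10) || decide (c.toNat = 13) || decide (c.toNat = 11) ||
       decide (c.toNat = 12) || decide (c.toNat = 28) || decide (c.toNat = 29) ||
       decide (c.toNat = 30) || decide (c.toNat = 133) || decide (c.toNat = 8232) ||
       decide (c.toNat = 8233)) = false := by
    intro c hc hn hr
    simp only [pvDomChar, Bool.or_eq_true, Bool.and_eq_true, decide_eq_true_eq,
      beq_iff_eq] at hc
    have h10 : c.toNat ≠ 10 := fun h => hn (pvChar_eq_of_toNat h)
    have h13 : c.toNat ≠ 13 := fun h => hr (pvChar_eq_of_toNat h)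
    simp only [Bool.or_eq_false_iff, decide_eq_false_iff_not]
    omega
  have hchars : ∀ c ∈ card.toList, pvDomChar c = true := by
    intro c hc
    simp only [pvDomStr, List.all_eq_true] at hdom
    exact hdom c hc
  have h2 := pvGo_len _ (by decide) (by decide) hoth [] card.toList hchars []
  simpa [PySem.Chars.splitlines] using h2

-- ===== VERDICT (by name: the statement is the Claim_ definition above) =====
theorem line_char_bounds_py_spec : Claim_equal_line_char_bounds_py := by
  intro card_start card line_no hdom hpre
  obtain ⟨h0, hlt'⟩ := hpre
  have hds : pvDomStr card = true := by
    unfold Dom_line_char_bounds_py at hdom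
    simp only [Bool.and_eq_true] at hdom
    exact hdom.1.2
  rw [pvSplitlines_len card hds] at hlt'
  have hlt := hlt'
  unfold Spec_line_char_bounds_py line_char_bounds_py line_char_bounds_py_alt
  set lines := pvSplitKeep [] card.toList with hlines
  have hcond : 0 ≤ line_no ∧ line_no < (lines.length : Int) := ⟨h0, hlt⟩
  rw [if_pos hcond]
  have hA := lcbLoopA_eq card_start line_no lines 1 0 (by omega) (by omega)
  have hkn : (line_no + 1 - 1).toNat = line_no.toNat := by omega
  rw [hkn] at hA
  have hlen : (lcbOffsets 0 lines).length = lines.length + 1 := lcbOffsets_length lines 0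
  have g1 : PySem.List.pyGetD (lcbOffsets 0 lines) line_no 0 = pvPre lines line_no.toNat := by
    rw [PySem.List.pyGetD_eq_getElem _ _ h0 (by rw [hlen]; push_cast; omega),
      ← List.getD_eq_getElem (lcbOffsets 0 lines) 0 (by rw [hlen]; omega),
      lcbOffsets_getD lines 0 line_no.toNat (by omega)]
    ring
  have g2 : PySem.List.pyGetD (lcbOffsets 0 lines) (line_no + 1) 0 = pvPre lines (line_no.toNat + 1) := by
    rw [PySem.List.pyGetD_eq_getElem _ _ (by omega) (by rw [hlen]; push_cast; omega)]
    simp only [show (line_no + 1).toNat = line_no.toNat + 1 from by omega]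
    rw [← List.getD_eq_getElem (lcbOffsets 0 lines) 0 (by rw [hlen]; omega),
      lcbOffsets_getD lines 0 (line_no.toNat + 1) (by omega)]
    ring
  rw [hA, g1, g2]
  simp
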